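-- pv_equiv track=rewrite | github.com/kftlfd/leetcode | 2025/12/1413-3623-CountNumberOfTrapezoids1.py | countTrapezoids
-- ===== SOURCE A (Python) =====
-- from collections import defaultdict
-- from typing import List
--
-- def countTrapezoids(points: List[List[int]]) -> int:
--     point_num = defaultdict(int)
--     mod = 10**9 + 7
--     ans, total_sum = 0, 0
--     for point in points:
--         point_num[point[1]] += 1
--     for p_num in point_num.values():
--         edge = p_num * (p_num - 1) // 2
--         ans = (ans + edge * total_sum) % mod
--         total_sum = (total_sum + edge) % mod
--     return ans
-- ===== SOURCE B (Python) =====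
-- from collections import Counter
--
-- def countTrapezoids(points):
--     mod = 10**9 + 7
--     edges = [k * (k - 1) // 2 for k in Counter(p[1] for p in points).values()]
--     s = sum(edges)
--     q = sum(e * e for e in edges)
--     return ((s * s - q) // 2) % mod
-- ===== Notes on version B (the rewrite author's own statement) =====
-- stated objective: alternative
-- what changed: Replaces the sequential running-sum accumulation with mod at every step by a closed form: collect per-level edge counts once, take their exact sum S and sum of squares Q, and return ((S*S - Q)//2) % mod using the identity sum_{i<j} e_i*e_j = (S^2 - sum e_i^2)/2.
import Mathlib
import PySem

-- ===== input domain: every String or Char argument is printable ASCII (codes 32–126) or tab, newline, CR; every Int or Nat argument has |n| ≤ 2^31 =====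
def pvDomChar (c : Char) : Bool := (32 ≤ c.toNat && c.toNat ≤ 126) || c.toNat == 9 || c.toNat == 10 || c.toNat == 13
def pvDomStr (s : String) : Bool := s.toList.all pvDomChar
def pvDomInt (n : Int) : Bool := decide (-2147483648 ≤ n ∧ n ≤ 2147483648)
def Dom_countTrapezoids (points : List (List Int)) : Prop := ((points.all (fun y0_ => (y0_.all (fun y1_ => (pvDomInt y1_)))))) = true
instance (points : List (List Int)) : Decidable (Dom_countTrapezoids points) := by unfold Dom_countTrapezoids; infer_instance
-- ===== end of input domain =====

-- B replaces A's mod-at-every-step running-sum accumulation by the closed form ((S^2 - Q)//2) % mod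
-- over exact integer sums of the per-level edge counts; return values proved equal on Pre_.

-- ===== PORT A =====
def countTrapezoids (points : List (List Int)) : Int :=
  let point_num : PySem.Dict Int Int :=
    points.foldl (fun d point => d.modify (PySem.List.pyGetD point 1 0) 0 (· + 1)) PySem.Dict.empty
  let st :=
    point_num.values.foldl
      (fun (st : Int × Int) p_num =>
        let edge := PySem.Int.floordiv (p_num * (p_num - 1)) 2
        (PySem.Int.mod (st.1 + edge * st.2) 1000000007,
         PySem.Int.mod (st.2 + edge) 1000000007))
      (0, 0)
  st.1

-- ===== PORT B =====
def countTrapezoids_alt (points : List (List Int)) : Int :=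
  let edges :=
    (PySem.Dict.counter (points.map (fun p => PySem.List.pyGetD p 1 0))).values.map
      (fun k => PySem.Int.floordiv (k * (k - 1)) 2)
  let s := edges.foldl (· + ·) 0
  let q := (edges.map (fun e => e * e)).foldl (· + ·) 0
  PySem.Int.mod (PySem.Int.floordiv (s * s - q) 2) 1000000007

-- ===== PRECONDITION & SPEC =====
-- Pre_ excludes exactly the inputs where Python's point[1] raises IndexError: some point has fewer than 2 coordinates.
def Pre_countTrapezoids (points : List (List Int)) : Prop :=
  ∀ p ∈ points, 2 ≤ p.length
instance (points : List (List Int)) : Decidable (Pre_countTrapezoids points) := by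
  unfold Pre_countTrapezoids; infer_instance
def pvWitness_countTrapezoids : List (List Int) := [[0, 1], [2, 1], [0, 2], [3, 2], [5, 1]]

def Spec_countTrapezoids (points : List (List Int)) (out : Int) : Prop := out = countTrapezoids_alt points
instance (points : List (List Int)) (out : Int) : Decidable (Spec_countTrapezoids points out) := by unfold Spec_countTrapezoids; infer_instance

-- ===== CLAIM (what is proved, stated in full; the proofs are below) =====
def Claim_equal_countTrapezoids : Prop := ∀ (points : List (List Int)), Dom_countTrapezoids points → Pre_countTrapezoids points → Spec_countTrapezoids points (countTrapezoids points)

-- ===== LEMMAS AND PROOFS =====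

-- pairwise product sum of a list, in A's accumulation order
def pvPP : List Int → Int
  | [] => 0
  | e :: es => e * (es.foldl (· + ·) 0) + pvPP es

lemma pv_foldl_add_shift (es : List Int) (a : Int) :
    es.foldl (· + ·) a = a + es.foldl (· + ·) 0 := by
  induction es generalizing a with
  | nil => simp
  | cons e es ih =>
    simp only [List.foldl_cons, zero_add]
    rw [ih (a + e), ih e]; ring

lemma pv_modeq_emod (x m : Int) : x % m ≡ x [ZMOD m] :=
  Int.emod_emod_of_dvd x dvd_rfl

lemma pv_loop (es : List Int) (a t : Int) :
    (es.foldl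
      (fun (st : Int × Int) e =>
        (PySem.Int.mod (st.1 + e * st.2) 1000000007,
         PySem.Int.mod (st.2 + e) 1000000007))
      (a % 1000000007, t % 1000000007)).1
    = (a + t * (es.foldl (· + ·) 0) + pvPP es) % 1000000007 := by
  induction es generalizing a t with
  | nil => simp [pvPP]
  | cons e es ih =>
    simp only [List.foldl_cons, zero_add]
    have hm : (0 : Int) < 1000000007 := by norm_num
    rw [PySem.Int.mod_eq_emod_of_pos hm, PySem.Int.mod_eq_emod_of_pos hm]
    have h1 : (a % 1000000007 + e * (t % 1000000007)) % 1000000007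
        = (a + e * t) % 1000000007 :=
      ((pv_modeq_emod a 1000000007).add ((Int.ModEq.refl e).mul (pv_modeq_emod t 1000000007)))
    have h2 : (t % 1000000007 + e) % 1000000007 = (t + e) % 1000000007 :=
      ((pv_modeq_emod t 1000000007).add (Int.ModEq.refl e))
    rw [h1, h2, ih (a + e * t) (t + e)]
    simp only [pvPP]
    rw [pv_foldl_add_shift es e]
    congr 1
    ring

lemma pv_pp2 (es : List Int) :
    2 * pvPP es
      = (es.foldl (· + ·) 0) * (es.foldl (· + ·) 0)
        - (es.map (fun e => e * e)).foldl (· + ·) 0 := by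
  induction es with
  | nil => simp [pvPP]
  | cons e es ih =>
    simp only [pvPP, List.map_cons, List.foldl_cons, zero_add]
    rw [pv_foldl_add_shift es e, pv_foldl_add_shift (es.map (fun e => e * e)) (e * e)]
    rw [mul_add, ih]; ring

lemma pv_main (vals : List Int) :
    (vals.foldl
      (fun (st : Int × Int) p_num =>
        (PySem.Int.mod (st.1 + PySem.Int.floordiv (p_num * (p_num - 1)) 2 * st.2) 1000000007,
         PySem.Int.mod (st.2 + PySem.Int.floordiv (p_num * (p_num - 1)) 2) 1000000007))
      (0, 0)).1
    = PySem.Int.mod (PySem.Int.floordiv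
        (vals.foldl (fun x y => x + PySem.Int.floordiv (y * (y - 1)) 2) 0 *
           vals.foldl (fun x y => x + PySem.Int.floordiv (y * (y - 1)) 2) 0 -
         vals.foldl
           (fun x y => x + PySem.Int.floordiv (y * (y - 1)) 2 * PySem.Int.floordiv (y * (y - 1)) 2)
           0) 2) 1000000007 := by
  have hm : (0 : Int) < 1000000007 := by norm_num
  set es := vals.map (fun k => PySem.Int.floordiv (k * (k - 1)) 2) with hes
  have hA : (vals.foldl
      (fun (st : Int × Int) p_num =>
        (PySem.Int.mod (st.1 + PySem.Int.floordiv (p_num * (p_num - 1)) 2 * st.2) 1000000007,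
         PySem.Int.mod (st.2 + PySem.Int.floordiv (p_num * (p_num - 1)) 2) 1000000007))
      (0, 0)).1 = pvPP es % 1000000007 := by
    have h := pv_loop es 0 0
    rw [hes, List.foldl_map] at h
    simp only [Int.zero_emod, zero_mul, add_zero, zero_add] at h
    rw [← hes] at h
    exact h
  have hs : vals.foldl (fun x y => x + PySem.Int.floordiv (y * (y - 1)) 2) 0
      = es.foldl (· + ·) 0 := by
    rw [hes, List.foldl_map]
  have hq : vals.foldl
      (fun x y => x + PySem.Int.floordiv (y * (y - 1)) 2 * PySem.Int.floordiv (y * (y - 1)) 2) 0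
      = (es.map (fun e => e * e)).foldl (· + ·) 0 := by
    rw [hes, List.foldl_map, List.foldl_map]
  rw [hA, hs, hq, ← pv_pp2 es, PySem.Int.mod_eq_emod_of_pos hm,
    PySem.Int.floordiv_eq_ediv_of_pos (show (0 : Int) < 2 by norm_num),
    Int.mul_ediv_cancel_left _ (show (2 : Int) ≠ 0 by norm_num)]

-- ===== VERDICT (by name: the statement is the Claim_ definition above) =====
theorem countTrapezoids_spec : Claim_equal_countTrapezoids := by
  intro points _ _
  show countTrapezoids points = countTrapezoids_alt points
  unfold countTrapezoids countTrapezoids_alt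
  simp only [PySem.Dict.counter_eq_foldl, List.foldl_map]
  exact pv_main _
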